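-- pv_equiv track=rewrite | github.com/Adebowale-Morakinyo/CodeWars-Challenges | Deaf_Rats_of_Hamelin/deaf_rats.py | count_deaf_rats
-- ===== SOURCE A (Python) =====
-- def count_deaf_rats(town_square):
--     piper_position = None
--     deaf_rats = 0
--
--     for row_index, row in enumerate(town_square):
--         for col_index, cell in enumerate(row):
--             if cell == 'P':
--                 piper_position = (row_index, col_index)
--
--     if piper_position is None:
--         return 0  # The Piper is not present, so there are no deaf rats
--
--     for row_index, row in enumerate(town_square):
--         for col_index, cell in enumerate(row):
--             if cell != ' ' and cell != 'P':
--                 rat_position = (row_index, col_index)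
--                 distance = (piper_position[0] - rat_position[0])**2 + (piper_position[1] - rat_position[1])**2
--                 if distance > 0:
--                     deaf_rats += 1
--
--     return deaf_rats
-- ===== SOURCE B (Python) =====
-- def count_deaf_rats(town_square):
--     total = spaces = pipers = 0
--     for row in town_square:
--         total += len(row)
--         spaces += row.count(' ')
--         pipers += row.count('P')
--     return total - spaces - pipers if pipers else 0
-- ===== Notes on version B (the rewrite author's own statement) =====
-- stated objective: simpler
-- what changed: B replaces A's two nested passes (last-Piper position search plus per-cell squared-distance test) with one aggregate pass summing length/space-count/Piper-count per row and a final arithmetic subtraction; the distance test is provably redundant since a non-'P' cell can never sit at the Piper's position.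
import Mathlib
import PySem

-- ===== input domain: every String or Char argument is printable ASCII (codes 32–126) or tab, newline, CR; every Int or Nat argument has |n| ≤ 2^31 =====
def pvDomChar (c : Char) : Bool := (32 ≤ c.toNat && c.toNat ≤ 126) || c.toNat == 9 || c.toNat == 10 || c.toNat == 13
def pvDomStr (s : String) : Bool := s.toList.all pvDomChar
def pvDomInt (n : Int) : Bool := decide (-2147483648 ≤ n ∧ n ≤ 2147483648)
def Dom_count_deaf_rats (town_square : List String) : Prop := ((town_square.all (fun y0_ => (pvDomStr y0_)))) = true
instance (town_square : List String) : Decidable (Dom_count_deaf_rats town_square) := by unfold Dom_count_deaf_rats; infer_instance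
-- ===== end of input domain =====

-- B replaces A's two nested passes (position search + per-cell distance test) with one
-- aggregate pass (total/space/Piper tallies) and a final subtraction; same O(n) cost, simpler.


-- ===== PORT A =====
-- first nested loop: remember the (row, col) of the last 'P' seen
def pvFindRow (ri : Nat) (cs : List Char) (ci : Nat) (acc : Option (Nat × Nat)) :
    Option (Nat × Nat) :=
  match cs with
  | [] => acc
  | c :: t => pvFindRow ri t (ci + 1) (if c = 'P' then some (ri, ci) else acc)

def pvFind (rows : List (List Char)) (ri : Nat) (acc : Option (Nat × Nat)) :
    Option (Nat × Nat) :=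
  match rows with
  | [] => acc
  | r :: t => pvFind t (ri + 1) (pvFindRow ri r 0 acc)

-- second nested loop: count non-space non-'P' cells at positive squared distance
def pvCountRow (p : Nat × Nat) (ri : Nat) (cs : List Char) (ci : Nat) (acc : Int) : Int :=
  match cs with
  | [] => acc
  | c :: t =>
      pvCountRow p ri t (ci + 1)
        (if c ≠ ' ' ∧ c ≠ 'P' then
           (if ((p.1 : Int) - (ri : Int)) ^ 2 + ((p.2 : Int) - (ci : Int)) ^ 2 > 0
            then acc + 1 else acc)
         else acc)

def pvCountAll (p : Nat × Nat) (rows : List (List Char)) (ri : Nat) (acc : Int) : Int :=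
  match rows with
  | [] => acc
  | r :: t => pvCountAll p t (ri + 1) (pvCountRow p ri r 0 acc)

def count_deaf_rats (town_square : List String) : Int :=
  let rows := town_square.map String.toList
  match pvFind rows 0 none with
  | none => 0
  | some p => pvCountAll p rows 0 0

-- ===== PORT B =====
-- one pass accumulating (total cells, spaces, pipers); row.count(c) ported as List.count
def count_deaf_rats_alt (town_square : List String) : Int :=
  let agg := town_square.foldl
    (fun (a : Int × Int × Int) row =>
      (a.1 + (row.toList.length : Int),
       a.2.1 + (row.toList.count ' ' : Int),
       a.2.2 + (row.toList.count 'P' : Int)))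
    (0, 0, 0)
  if agg.2.2 = 0 then 0 else agg.1 - agg.2.1 - agg.2.2

-- ===== PRECONDITION & SPEC =====
def Spec_count_deaf_rats (town_square : List String) (out : Int) : Prop := out = count_deaf_rats_alt town_square
instance (town_square : List String) (out : Int) : Decidable (Spec_count_deaf_rats town_square out) := by unfold Spec_count_deaf_rats; infer_instance

-- ===== CLAIM (what is proved, stated in full; the proofs are below) =====
def Claim_equal_count_deaf_rats : Prop := ∀ (town_square : List String), Dom_count_deaf_rats town_square → Spec_count_deaf_rats town_square (count_deaf_rats town_square)

-- ===== LEMMAS AND PROOFS =====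

-- where pvFindRow can return some (r,c): either its accumulator, or a 'P' in its row
theorem pvFindRow_spec (ri : Nat) (cs : List Char) (ci : Nat) (acc : Option (Nat × Nat))
    (r c : Nat) (h : pvFindRow ri cs ci acc = some (r, c)) :
    acc = some (r, c) ∨ (r = ri ∧ ∃ j, c = ci + j ∧ cs[j]? = some 'P') := by
  induction cs generalizing ci acc with
  | nil => exact Or.inl h
  | cons c0 t ih =>
      rcases ih (ci + 1) _ h with h' | ⟨hr, j, hc, hj⟩
      · by_cases hP : c0 = 'P'
        · simp [hP] at h'
          exact Or.inr ⟨h'.1.symm, 0, by omega, by simp [hP]⟩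
        · simp [hP] at h'
          exact Or.inl h'
      · exact Or.inr ⟨hr, j + 1, by omega, by simpa using hj⟩

-- a found Piper position really indexes a 'P' in the grid
theorem pvFind_spec (rows : List (List Char)) (ri : Nat) (acc : Option (Nat × Nat))
    (r c : Nat) (h : pvFind rows ri acc = some (r, c)) :
    acc = some (r, c) ∨
      (∃ j cs, rows[j]? = some cs ∧ r = ri + j ∧ cs[c]? = some 'P') := by
  induction rows generalizing ri acc with
  | nil => exact Or.inl h
  | cons s t ih =>
      rcases ih (ri + 1) _ h with h' | ⟨j, cs, hj, hr, hc⟩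
      · rcases pvFindRow_spec ri s 0 acc r c h' with h'' | ⟨hr, j, hcj, hj⟩
        · exact Or.inl h''
        · exact Or.inr ⟨0, s, by simp, by omega, by simpa [hcj] using hj⟩
      · exact Or.inr ⟨j + 1, cs, by simpa using hj, by omega, hc⟩

-- if no 'P' occurs, the search leaves the accumulator unchanged
theorem pvFindRow_no_P (ri : Nat) (cs : List Char) (ci : Nat) (acc : Option (Nat × Nat))
    (h : 'P' ∉ cs) : pvFindRow ri cs ci acc = acc := by
  induction cs generalizing ci acc with
  | nil => rfl
  | cons c0 t ih =>
      simp only [List.mem_cons, not_or] at h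
      simp [pvFindRow, Ne.symm h.1, ih _ _ h.2]

-- if some 'P' occurs, the search returns some position
theorem pvFindRow_isSome (ri : Nat) (cs : List Char) (ci : Nat) (acc : Option (Nat × Nat))
    (h : 'P' ∈ cs) : (pvFindRow ri cs ci acc).isSome := by
  induction cs generalizing ci acc with
  | nil => cases h
  | cons c0 t ih =>
      by_cases ht : 'P' ∈ t
      · exact ih _ _ ht
      · have hc0 : c0 = 'P' := by
          rcases List.mem_cons.mp h with h' | h'
          · exact h'.symm
          · exact absurd h' ht
        rw [pvFindRow, pvFindRow_no_P _ _ _ _ ht]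
        simp [hc0]

theorem pvFindRow_isSome_of_acc (ri : Nat) (cs : List Char) (ci : Nat)
    (acc : Option (Nat × Nat)) (h : acc.isSome) : (pvFindRow ri cs ci acc).isSome := by
  induction cs generalizing ci acc with
  | nil => exact h
  | cons c0 t ih =>
      apply ih
      by_cases hc : c0 = 'P' <;> simp [hc, h]

theorem pvFind_isSome_of_acc (rows : List (List Char)) (ri : Nat) (acc : Option (Nat × Nat))
    (h : acc.isSome) : (pvFind rows ri acc).isSome := by
  induction rows generalizing ri acc with
  | nil => exact h
  | cons s t ih => exact ih _ _ (pvFindRow_isSome_of_acc _ _ _ _ h)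

theorem pvFind_isSome (rows : List (List Char)) (ri : Nat) (acc : Option (Nat × Nat))
    (h : ∃ cs ∈ rows, 'P' ∈ cs) : (pvFind rows ri acc).isSome := by
  induction rows generalizing ri acc with
  | nil => simp at h
  | cons s t ih =>
      rcases h with ⟨cs, hmem, hP⟩
      rcases List.mem_cons.mp hmem with rfl | hmem'
      · exact pvFind_isSome_of_acc t (ri + 1) _ (pvFindRow_isSome ri cs 0 acc hP)
      · exact ih _ _ ⟨cs, hmem', hP⟩

-- per-row value B computes
def pvRowKey (cs : List Char) : Int :=
  (cs.length : Int) - (cs.count ' ' : Int) - (cs.count 'P' : Int)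

-- A's counting pass, per row: with the Piper-position knowledge, the distance test is
-- redundant and the count is length - spaces - pipers
theorem pvCountRow_eq (p : Nat × Nat) (ri : Nat) (cs : List Char) (ci : Nat) (acc : Int)
    (H : ∀ j x, cs[j]? = some x → p.1 = ri → p.2 = ci + j → x = 'P') :
    pvCountRow p ri cs ci acc = acc + pvRowKey cs := by
  induction cs generalizing ci acc with
  | nil => simp [pvCountRow, pvRowKey]
  | cons c0 t ih =>
      have Ht : ∀ j x, t[j]? = some x → p.1 = ri → p.2 = (ci + 1) + j → x = 'P' := by
        intro j x hj h1 h2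
        exact H (j + 1) x (by simpa using hj) h1 (by omega)
      rw [pvCountRow, ih _ _ Ht]
      by_cases hs : c0 = ' '
      · simp [hs, pvRowKey]; try ring
      · by_cases hP : c0 = 'P'
        · simp [hP, pvRowKey]; try ring
        · have hdist : ((p.1 : Int) - (ri : Int)) ^ 2 + ((p.2 : Int) - (ci : Int)) ^ 2 > 0 := by
            by_contra hle
            push Not at hle
            have h1 : (p.1 : Int) = (ri : Int) ∧ (p.2 : Int) = (ci : Int) := by
              constructor <;> nlinarith [sq_nonneg ((p.1 : Int) - (ri : Int)),
                sq_nonneg ((p.2 : Int) - (ci : Int))]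
            have hp1 : p.1 = ri := by exact_mod_cast h1.1
            have hp2 : p.2 = ci := by exact_mod_cast h1.2
            exact hP (H 0 c0 (by simp) hp1 (by omega))
          simp [hs, hP, hdist, pvRowKey]
          ring

theorem pvCountAll_eq (p : Nat × Nat) (rows : List (List Char)) (ri : Nat) (acc : Int)
    (H : ∀ j cs, rows[j]? = some cs →
          ∀ k x, cs[k]? = some x → p.1 = ri + j → p.2 = k → x = 'P') :
    pvCountAll p rows ri acc = acc + (rows.map pvRowKey).sum := by
  induction rows generalizing ri acc with
  | nil => simp [pvCountAll]
  | cons s t ih =>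
      have Hs : ∀ j x, s[j]? = some x → p.1 = ri → p.2 = 0 + j → x = 'P' := by
        intro j x hj h1 h2
        exact H 0 s (by simp) j x hj (by omega) (by omega)
      have Ht : ∀ j cs, t[j]? = some cs →
          ∀ k x, cs[k]? = some x → p.1 = (ri + 1) + j → p.2 = k → x = 'P' := by
        intro j cs hj k x hk h1 h2
        exact H (j + 1) cs (by simpa using hj) k x hk (by omega) h2
      rw [pvCountAll, ih _ _ Ht, pvCountRow_eq _ _ _ _ _ Hs]
      simp
      ring

-- B's fold computes componentwise sums
theorem pvFold_eq (ts : List String) (a b c : Int) :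
    ts.foldl
      (fun (a : Int × Int × Int) row =>
        (a.1 + (row.toList.length : Int),
         a.2.1 + (row.toList.count ' ' : Int),
         a.2.2 + (row.toList.count 'P' : Int)))
      (a, b, c) =
    (a + ((ts.map (fun s => (s.toList.length : Int))).sum),
     b + ((ts.map (fun s => (s.toList.count ' ' : Int))).sum),
     c + ((ts.map (fun s => (s.toList.count 'P' : Int))).sum)) := by
  induction ts generalizing a b c with
  | nil => simp
  | cons s t ih => rw [List.foldl_cons, ih]; simp; constructor <;> [skip; constructor] <;> ring

theorem pvSumP_zero_iff (rows : List (List Char)) :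
    ((rows.map (fun cs => (cs.count 'P' : Int))).sum = 0) ↔ ∀ cs ∈ rows, 'P' ∉ cs := by
  induction rows with
  | nil => simp
  | cons s t ih =>
      simp only [List.map_cons, List.sum_cons, List.mem_cons]
      constructor
      · intro h
        have hs : (s.count 'P' : Int) ≥ 0 := by positivity
        have htl : (t.map (fun cs => (cs.count 'P' : Int))).sum ≥ 0 := by
          apply List.sum_nonneg; intro x hx
          simp only [List.mem_map] at hx
          obtain ⟨cs, _, rfl⟩ := hx
          positivity
        have h1 : (s.count 'P' : Int) = 0 := by omega
        have h2 : (t.map (fun cs => (cs.count 'P' : Int))).sum = 0 := by omega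
        intro cs hcs
        rcases hcs with rfl | hcs
        · have : cs.count 'P' = 0 := by exact_mod_cast h1
          simpa [List.count_eq_zero] using this
        · exact (ih.mp h2) cs hcs
      · intro h
        have h1 : s.count 'P' = 0 := List.count_eq_zero.mpr (h s (Or.inl rfl))
        have h2 := ih.mpr (fun cs hcs => h cs (Or.inr hcs))
        simp [h1, h2]

theorem pvSum_split (rows : List (List Char)) :
    (rows.map (fun cs => (cs.length : Int))).sum
      - (rows.map (fun cs => (cs.count ' ' : Int))).sum
      - (rows.map (fun cs => (cs.count 'P' : Int))).sum
      = (rows.map pvRowKey).sum := by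
  induction rows with
  | nil => simp
  | cons s t ih => simp [pvRowKey]; linarith

-- ===== VERDICT (by name: the statement is the Claim_ definition above) =====
theorem count_deaf_rats_spec : Claim_equal_count_deaf_rats := by
  intro ts _
  unfold Spec_count_deaf_rats count_deaf_rats count_deaf_rats_alt
  simp only []
  rw [pvFold_eq]
  set rows := ts.map String.toList with hrows
  have hmaps : ∀ (f : List Char → Int),
      ts.map (fun s => f s.toList) = rows.map f := by
    intro f; simp [hrows]
  rw [hmaps (fun cs => (cs.length : Int)), hmaps (fun cs => (cs.count ' ' : Int)),
      hmaps (fun cs => (cs.count 'P' : Int))]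
  cases hfind : pvFind rows 0 none with
  | none =>
      -- no Piper: B's piper tally must be zero
      have hnoP : ∀ cs ∈ rows, 'P' ∉ cs := by
        intro cs hcs hP
        have := pvFind_isSome rows 0 none ⟨cs, hcs, hP⟩
        rw [hfind] at this
        simp at this
      have : (rows.map (fun cs => (cs.count 'P' : Int))).sum = 0 :=
        (pvSumP_zero_iff rows).mpr hnoP
      simp [this]
  | some p =>
      obtain ⟨r, c⟩ := p
      show pvCountAll (r, c) rows 0 0 = _
      rcases pvFind_spec rows 0 none r c hfind with h | ⟨j, cs0, hj, hr, hc⟩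
      · simp at h
      -- the found position indexes a 'P'; supply the count invariant
      have H : ∀ j' cs, rows[j']? = some cs →
          ∀ k x, cs[k]? = some x → (r, c).1 = 0 + j' → (r, c).2 = k → x = 'P' := by
        intro j' cs hj' k x hk h1 h2
        simp only [] at h1 h2
        have hj'' : j' = j := by omega
        subst hj''
        have hcs : cs = cs0 := by rw [hj] at hj'; exact (Option.some_inj.mp hj').symm
        subst hcs
        have hk' : k = c := by omega
        subst hk'
        rw [hc] at hk
        exact (Option.some_inj.mp hk).symm
      rw [pvCountAll_eq _ _ _ _ H]
      -- B's piper tally is nonzero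
      have hPmem : 'P' ∈ cs0 := List.mem_of_getElem? hc
      have hne : (rows.map (fun cs => (cs.count 'P' : Int))).sum ≠ 0 := by
        intro h0
        exact ((pvSumP_zero_iff rows).mp h0) cs0 (List.mem_of_getElem? hj) hPmem
      simp only [zero_add, hne, if_false]
      rw [← pvSum_split]
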